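-- pv_equiv track=rewrite | github.com/ln-one/Spectra | backend/services/generation_session_service/teaching_brief.py | remove_proposal_by_id
-- ===== SOURCE A (Python) =====
-- from typing import Any, Optional
--
-- def _normalize_text(value: Any) -> str:
--     return str(value or "").strip()
--
-- def remove_proposal_by_id(
--     proposals: list[dict[str, Any]],
--     proposal_id: str,
-- ) -> tuple[list[dict[str, Any]], Optional[dict[str, Any]]]:
--     normalized_id = _normalize_text(proposal_id)
--     kept: list[dict[str, Any]] = []
--     removed: Optional[dict[str, Any]] = None
--     for proposal in proposals:
--         current_id = _normalize_text(proposal.get("proposal_id"))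
--         if removed is None and current_id == normalized_id:
--             removed = proposal
--             continue
--         kept.append(proposal)
--     return kept, removed
-- ===== SOURCE B (Python) =====
-- def remove_proposal_by_id(proposals, proposal_id):
--     target = str(proposal_id or "").strip()
--     idx = next(
--         (i for i, p in enumerate(proposals)
--          if str(p.get("proposal_id") or "").strip() == target),
--         None,
--     )
--     if idx is None:
--         return list(proposals), None
--     return proposals[:idx] + proposals[idx + 1:], proposals[idx]
-- ===== Notes on version B (the rewrite author's own statement) =====
-- stated objective: alternative
-- what changed: Replaces A's accumulator build-loop (state kept/removed threaded through every element) with a locate-then-reassemble two-step: find the index of the first matching proposal, then return slices around it.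
import Mathlib
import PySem

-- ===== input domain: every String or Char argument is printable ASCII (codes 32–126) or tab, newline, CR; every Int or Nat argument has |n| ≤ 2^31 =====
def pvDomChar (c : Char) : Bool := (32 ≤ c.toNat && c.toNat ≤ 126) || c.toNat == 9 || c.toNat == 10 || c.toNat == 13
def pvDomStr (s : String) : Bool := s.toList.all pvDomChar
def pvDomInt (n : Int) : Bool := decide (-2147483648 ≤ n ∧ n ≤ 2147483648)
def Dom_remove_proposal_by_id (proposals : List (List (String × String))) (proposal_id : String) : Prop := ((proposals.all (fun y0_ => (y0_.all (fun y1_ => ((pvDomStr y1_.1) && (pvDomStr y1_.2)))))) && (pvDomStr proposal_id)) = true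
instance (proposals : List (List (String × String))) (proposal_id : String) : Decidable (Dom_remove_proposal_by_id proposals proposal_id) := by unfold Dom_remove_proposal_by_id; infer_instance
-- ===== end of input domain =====

-- B replaces A's accumulator build-loop with locate-the-first-match-then-reassemble-by-slices (alternative decomposition, same cost; return-value equivalence).


-- ===== PORT A =====
-- _normalize_text(p.get("proposal_id")): dict lookup (assoc list, first match) then str(v or "").strip()
def pvNormPid (p : List (String × String)) : String :=
  PySem.Str.strip (((PySem.Dict.mk p).get? "proposal_id").getD "")

-- the loop body of A: state = (kept, removed)
def pvStepA (norm : String)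
    (s : List (List (String × String)) × Option (List (String × String)))
    (proposal : List (String × String)) :
    List (List (String × String)) × Option (List (String × String)) :=
  let current_id := pvNormPid proposal
  match s.2 with
  | none => if current_id == norm then (s.1, some proposal) else (s.1 ++ [proposal], none)
  | some _ => (s.1 ++ [proposal], s.2)

def remove_proposal_by_id (proposals : List (List (String × String))) (proposal_id : String) : (List (List (String × String))) × (Option (List (String × String))) :=
  let normalized_id := PySem.Str.strip proposal_id
  proposals.foldl (pvStepA normalized_id) ([], none)

-- ===== PORT B =====
def remove_proposal_by_id_alt (proposals : List (List (String × String))) (proposal_id : String) : (List (List (String × String))) × (Option (List (String × String))) :=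
  let target := PySem.Str.strip proposal_id
  match proposals.findIdx? (fun p => pvNormPid p == target) with
  | none => (proposals, none)
  | some i => (proposals.take i ++ proposals.drop (i + 1), proposals[i]?)

-- ===== PRECONDITION & SPEC =====
def Spec_remove_proposal_by_id (proposals : List (List (String × String))) (proposal_id : String) (out : (List (List (String × String))) × (Option (List (String × String)))) : Prop := out = remove_proposal_by_id_alt proposals proposal_id
instance (proposals : List (List (String × String))) (proposal_id : String) (out : (List (List (String × String))) × (Option (List (String × String)))) : Decidable (Spec_remove_proposal_by_id proposals proposal_id out) := by unfold Spec_remove_proposal_by_id; infer_instance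

-- ===== CLAIM (what is proved, stated in full; the proofs are below) =====
def Claim_equal_remove_proposal_by_id : Prop := ∀ (proposals : List (List (String × String))) (proposal_id : String), Dom_remove_proposal_by_id proposals proposal_id → Spec_remove_proposal_by_id proposals proposal_id (remove_proposal_by_id proposals proposal_id)

-- ===== LEMMAS AND PROOFS =====
theorem pvFoldA_some (n : String) (l : List (List (String × String)))
    (acc : List (List (String × String))) (x : List (String × String)) :
    l.foldl (pvStepA n) (acc, some x) = (acc ++ l, some x) := by
  induction l generalizing acc with
  | nil => simp
  | cons p rest ih => simp [pvStepA, ih]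

theorem pvFoldA_shift (n : String) (l : List (List (String × String)))
    (acc : List (List (String × String))) :
    l.foldl (pvStepA n) (acc, none) =
      (acc ++ (l.foldl (pvStepA n) ([], none)).1, (l.foldl (pvStepA n) ([], none)).2) := by
  induction l generalizing acc with
  | nil => simp
  | cons p rest ih =>
    by_cases h : pvNormPid p == n
    · simp [pvStepA, h, pvFoldA_some]
    · simp only [List.foldl_cons, pvStepA, h, Bool.false_eq_true, if_false, List.nil_append]
      rw [ih (acc ++ [p]), ih [p]]
      simp

theorem pvCore_eq (n : String) (l : List (List (String × String))) :
    l.foldl (pvStepA n) ([], none) =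
      (match l.findIdx? (fun p => pvNormPid p == n) with
       | none => (l, none)
       | some i => (l.take i ++ l.drop (i + 1), l[i]?)) := by
  induction l with
  | nil => simp
  | cons p rest ih =>
    by_cases h : pvNormPid p == n
    · simp [pvStepA, h, pvFoldA_some, List.findIdx?_cons]
    · rw [List.foldl_cons]
      simp only [pvStepA, h, Bool.false_eq_true, if_false, List.nil_append]
      rw [pvFoldA_shift n rest [p], ih]
      cases hf : rest.findIdx? (fun q => pvNormPid q == n) with
      | none => simp [List.findIdx?_cons, h, hf]
      | some i => simp [List.findIdx?_cons, h, hf, List.take_succ_cons, List.drop_succ_cons]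

-- ===== VERDICT (by name: the statement is the Claim_ definition above) =====
theorem remove_proposal_by_id_spec : Claim_equal_remove_proposal_by_id := by
  intro proposals proposal_id _
  unfold Spec_remove_proposal_by_id remove_proposal_by_id remove_proposal_by_id_alt
  exact pvCore_eq (PySem.Str.strip proposal_id) proposals
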